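-- pv_equiv track=rewrite | github.com/sigma-prog/exploding-kittens-web | app.py | find_matching_card
-- ===== SOURCE A (Python) =====
-- def find_matching_card(hand, query):
--     q = query.strip().lower()
--     for c in hand:
--         if c.lower() == q:
--             return c
--     for c in hand:
--         if c.lower().startswith(q):
--             return c
--     for c in hand:
--         if q in c.lower():
--             return c
--     return None
-- ===== SOURCE B (Python) =====
-- def find_matching_card(hand, query):
--     q = query.strip().lower()
--     prefix = None
--     sub = None
--     for c in hand:
--         cl = c.lower()
--         if cl == q:
--             return c
--         elif prefix is None and cl.startswith(q):
--             prefix = c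
--         elif sub is None and q in cl:
--             sub = c
--     return prefix if prefix is not None else sub
-- ===== Notes on version B (the rewrite author's own statement) =====
-- stated objective: alternative
-- what changed: Replaced A's three full passes over the hand (exact, then prefix, then substring) by a single pass that returns immediately on an exact match and records the first prefix and first substring candidates, computing lower() once per card.
import Mathlib
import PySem

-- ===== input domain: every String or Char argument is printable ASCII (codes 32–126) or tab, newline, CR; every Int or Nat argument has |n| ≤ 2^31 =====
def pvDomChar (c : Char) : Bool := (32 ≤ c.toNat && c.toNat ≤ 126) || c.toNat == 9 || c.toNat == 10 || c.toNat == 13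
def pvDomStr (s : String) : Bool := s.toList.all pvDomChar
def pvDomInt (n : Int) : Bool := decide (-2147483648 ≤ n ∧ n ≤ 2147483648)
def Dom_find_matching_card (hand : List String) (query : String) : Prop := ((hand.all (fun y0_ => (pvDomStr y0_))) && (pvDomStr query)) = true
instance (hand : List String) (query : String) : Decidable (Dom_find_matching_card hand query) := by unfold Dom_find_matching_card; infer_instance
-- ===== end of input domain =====

-- B replaces A's three full passes by ONE pass (early return on exact; first prefix and
-- first substring candidates recorded as loop state), computing lower() once per card.

-- ===== PORT A =====
-- A: three sequential for-loops with early return; each loop is List.find?.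
def fmcA (hand : List String) (q : String) : Option String :=
  match hand.find? (fun c => PySem.Str.lower c == q) with
  | some c => some c
  | none =>
    match hand.find? (fun c => PySem.Str.startswith (PySem.Str.lower c) q) with
    | some c => some c
    | none =>
      match hand.find? (fun c => PySem.Str.isIn q (PySem.Str.lower c)) with
      | some c => some c
      | none => none

def find_matching_card (hand : List String) (query : String) : Option String :=
  fmcA hand (PySem.Str.lower (PySem.Str.strip query))

-- ===== PORT B =====
-- B's single loop, carrying the prefix/substring candidates as state.
def fmcGo (q : String) : List String → Option String → Option String → Option String
  | [], pfx, sub => match pfx with | some c => some c | none => sub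
  | c :: rest, pfx, sub =>
    let cl := PySem.Str.lower c
    if cl == q then some c
    else if pfx.isNone && PySem.Str.startswith cl q then fmcGo q rest (some c) sub
    else if sub.isNone && PySem.Str.isIn q cl then fmcGo q rest pfx (some c)
    else fmcGo q rest pfx sub

def find_matching_card_alt (hand : List String) (query : String) : Option String :=
  fmcGo (PySem.Str.lower (PySem.Str.strip query)) hand none none

-- ===== PRECONDITION & SPEC =====
def Spec_find_matching_card (hand : List String) (query : String) (out : Option String) : Prop := out = find_matching_card_alt hand query
instance (hand : List String) (query : String) (out : Option String) : Decidable (Spec_find_matching_card hand query out) := by unfold Spec_find_matching_card; infer_instance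

-- ===== CLAIM (what is proved, stated in full; the proofs are below) =====
def Claim_equal_find_matching_card : Prop := ∀ (hand : List String) (query : String), Dom_find_matching_card hand query → Spec_find_matching_card hand query (find_matching_card hand query)

-- ===== LEMMAS AND PROOFS =====

-- Invariant of B's loop: its result is the first exact match, else the carried prefix
-- candidate, else the first prefix match, else the carried substring candidate, else the
-- first substring match.
theorem fmcGo_eq (q : String) : ∀ (l : List String) (pfx sub : Option String),
    fmcGo q l pfx sub =
      ((l.find? (fun c => PySem.Str.lower c == q)).orElse (fun _ =>
        pfx.orElse (fun _ =>
          (l.find? (fun c => PySem.Str.startswith (PySem.Str.lower c) q)).orElse (fun _ =>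
            sub.orElse (fun _ =>
              l.find? (fun c => PySem.Str.isIn q (PySem.Str.lower c))))))) := by
  intro l
  induction l with
  | nil =>
    intro pfx sub
    cases pfx <;> cases sub <;> simp [fmcGo, Option.orElse]
  | cons c rest ih =>
    intro pfx sub
    simp only [fmcGo]
    split_ifs with hex hp hs
    · simp at hex
      simp [List.find?_cons, hex, Option.orElse]
    · obtain ⟨hp1, hp2⟩ := Bool.and_eq_true_iff.mp hp
      have hpn : pfx = none := by cases pfx <;> simp_all
      subst hpn
      rw [ih]
      simp at hex hp2
      simp [List.find?_cons, hex, hp2, Option.orElse]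
    · obtain ⟨hs1, hs2⟩ := Bool.and_eq_true_iff.mp hs
      have hsn : sub = none := by cases sub <;> simp_all
      subst hsn
      rw [ih]
      simp at hex hs2
      cases pfx with
      | some p => simp [List.find?_cons, hex, hs2, Option.orElse]
      | none =>
        have hpre : PySem.Str.startswith (PySem.Str.lower c) q = false := by
          simpa using hp
        simp at hpre
        simp [List.find?_cons, hex, hpre, hs2, Option.orElse]
    · rw [ih]
      simp at hex
      cases pfx with
      | some p =>
        cases sub with
        | some s => simp [List.find?_cons, hex, Option.orElse]
        | none =>
          have hcon : PySem.Str.isIn q (PySem.Str.lower c) = false := by simpa using hs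
          simp at hcon
          simp [List.find?_cons, hex, hcon, Option.orElse]
      | none =>
        have hpre : PySem.Str.startswith (PySem.Str.lower c) q = false := by simpa using hp
        simp at hpre
        cases sub with
        | some s => simp [List.find?_cons, hex, hpre, Option.orElse]
        | none =>
          have hcon : PySem.Str.isIn q (PySem.Str.lower c) = false := by simpa using hs
          simp at hcon
          simp [List.find?_cons, hex, hpre, hcon, Option.orElse]

-- ===== VERDICT (by name: the statement is the Claim_ definition above) =====
theorem find_matching_card_spec : Claim_equal_find_matching_card := by
  intro hand query _
  unfold Spec_find_matching_card find_matching_card find_matching_card_alt fmcA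
  rw [fmcGo_eq]
  cases h1 : hand.find? (fun c => PySem.Str.lower c == PySem.Str.lower (PySem.Str.strip query)) with
  | some c => rfl
  | none =>
    cases h2 : hand.find? (fun c => PySem.Str.startswith (PySem.Str.lower c) (PySem.Str.lower (PySem.Str.strip query))) with
    | some c => rfl
    | none =>
      cases h3 : hand.find? (fun c => PySem.Str.isIn (PySem.Str.lower (PySem.Str.strip query)) (PySem.Str.lower c)) with
      | some c => rfl
      | none => rfl
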